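-- pv_equiv track=rewrite | github.com/mingzhangyang/structured-intelligence | skills/design-thermostable-mutations/scripts/design_thermostable_mutations.py | local_aggregation_delta
-- ===== SOURCE A (Python) =====
-- def _segment_aggregation_score(segment: str) -> int:
--     hydrophobic = set("FILVMWY")
--     beta_forming = set("VIYFWT")
--     hyd = sum(1 for aa in segment if aa in hydrophobic)
--     beta = sum(1 for aa in segment if aa in beta_forming)
--     return 1 if hyd >= 4 and beta >= 3 else 0
--
-- def local_aggregation_delta(sequence: str, position0: int, new_aa: str, window: int = 6) -> int:
--     if len(sequence) < window:
--         return 0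
--
--     start_min = max(0, position0 - window + 1)
--     start_max = min(position0, len(sequence) - window)
--     if start_min > start_max:
--         return 0
--
--     wt_hits = 0
--     mut_hits = 0
--     mutant_seq = sequence[:position0] + new_aa + sequence[position0 + 1 :]
--
--     for start in range(start_min, start_max + 1):
--         wt_hits += _segment_aggregation_score(sequence[start : start + window])
--         mut_hits += _segment_aggregation_score(mutant_seq[start : start + window])
--
--     return mut_hits - wt_hits
-- ===== SOURCE B (Python) =====
-- def local_aggregation_delta(sequence: str, position0: int, new_aa: str, window: int = 6) -> int:
--     if len(sequence) < window:
--         return 0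
--     start_min = max(0, position0 - window + 1)
--     start_max = min(position0, len(sequence) - window)
--     if start_min > start_max:
--         return 0
--     mutant_seq = sequence[:position0] + new_aa + sequence[position0 + 1:]
--
--     def hits(s):
--         # prefix counts: ph[i] / pb[i] = number of hydrophobic / beta-forming
--         # residues among the first i characters of s
--         ph = [0]
--         pb = [0]
--         for c in s:
--             ph.append(ph[-1] + (c in "FILVMWY"))
--             pb.append(pb[-1] + (c in "VIYFWT"))
--         n = len(s)
--         total = 0
--         for start in range(start_min, start_max + 1):
--             e = min(start + window, n)
--             b = min(start, n)
--             if ph[e] - ph[b] >= 4 and pb[e] - pb[b] >= 3: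
--                 total += 1
--         return total
--
--     return hits(mutant_seq) - hits(sequence)
-- ===== Notes on version B (the rewrite author's own statement) =====
-- stated objective: faster
-- what changed: Replaces A's per-window rescans (each window's hydrophobic/beta counts recomputed from scratch) by two prefix-count arrays built once per string, so each window score is an O(1) prefix difference.
import Mathlib
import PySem

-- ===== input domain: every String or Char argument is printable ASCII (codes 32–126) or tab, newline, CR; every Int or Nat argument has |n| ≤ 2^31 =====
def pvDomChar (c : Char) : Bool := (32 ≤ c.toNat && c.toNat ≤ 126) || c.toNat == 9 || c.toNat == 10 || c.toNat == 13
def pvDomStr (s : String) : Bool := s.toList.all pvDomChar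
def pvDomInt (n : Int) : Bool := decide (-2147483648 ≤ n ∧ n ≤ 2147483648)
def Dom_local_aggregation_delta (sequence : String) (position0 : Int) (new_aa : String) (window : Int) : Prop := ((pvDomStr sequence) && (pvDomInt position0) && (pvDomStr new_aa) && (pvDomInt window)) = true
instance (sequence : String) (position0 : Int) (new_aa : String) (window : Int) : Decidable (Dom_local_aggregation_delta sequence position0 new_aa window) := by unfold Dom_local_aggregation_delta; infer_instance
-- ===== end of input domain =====

-- B replaces A's per-window rescans by two prefix-count arrays built once, so each
-- window's hydrophobic/beta counts are O(1) prefix differences (objective: faster).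

-- ===== PORT A =====
-- A's helper _segment_aggregation_score, step for step (set(...) → PySem.Set,
-- sum(1 for aa in segment if aa in S) → foldl adding 1 under the membership test).
def pvSegScore (segment : List Char) : Int :=
  let hydrophobic := PySem.Set.ofList "FILVMWY".toList
  let beta_forming := PySem.Set.ofList "VIYFWT".toList
  let hyd := segment.foldl (fun a aa => a + (if aa ∈ hydrophobic then (1 : Int) else 0)) 0
  let beta := segment.foldl (fun a aa => a + (if aa ∈ beta_forming then (1 : Int) else 0)) 0
  if hyd ≥ 4 ∧ beta ≥ 3 then 1 else 0

def local_aggregation_delta (sequence : String) (position0 : Int) (new_aa : String) (window : Int) : Int :=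
  if PySem.Str.len sequence < window then 0
  else
    let start_min := max 0 (position0 - window + 1)
    let start_max := min position0 (PySem.Str.len sequence - window)
    if start_min > start_max then 0
    else
      let mutant_seq := PySem.List.slice sequence.toList none (some position0) ++ new_aa.toList ++ PySem.List.slice sequence.toList (some (position0 + 1)) none
      -- the for-loop: (wt_hits, mut_hits) accumulated over range(start_min, start_max+1)
      let p := (PySem.List.pyRange start_min (start_max + 1) 1).foldl
        (fun (p : Int × Int) start =>
          (p.1 + pvSegScore (PySem.List.slice sequence.toList (some start) (some (start + window))),
           p.2 + pvSegScore (PySem.List.slice mutant_seq (some start) (some (start + window)))))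
        (0, 0)
      p.2 - p.1

-- ===== PORT B =====
-- Source B's prefix-building loop (ph/pb appended element by element) as structural
-- recursion carrying acc = ph[-1]; the produced list is the same.
def pvPrefix (p : Char → Bool) (acc : Int) : List Char → List Int
  | [] => [acc]
  | c :: cs => acc :: pvPrefix p (acc + if p c then 1 else 0) cs

-- Source B's `c in "FILVMWY"` on a single character = character membership.
def pvHydB (c : Char) : Bool := "FILVMWY".toList.contains c
def pvBetaB (c : Char) : Bool := "VIYFWT".toList.contains c

-- Source B's hits(s): indexes ph/pb at clamped window ends.
def pvHits (start_min start_max window : Int) (s : List Char) : Int :=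
  let ph := pvPrefix pvHydB 0 s
  let pb := pvPrefix pvBetaB 0 s
  let n : Int := s.length
  (PySem.List.pyRange start_min (start_max + 1) 1).foldl
    (fun total start =>
      let e := min (start + window) n
      let b := min start n
      if PySem.List.pyGetD ph e 0 - PySem.List.pyGetD ph b 0 ≥ 4 ∧
         PySem.List.pyGetD pb e 0 - PySem.List.pyGetD pb b 0 ≥ 3 then total + 1 else total)
    0

def local_aggregation_delta_alt (sequence : String) (position0 : Int) (new_aa : String) (window : Int) : Int :=
  if PySem.Str.len sequence < window then 0
  else
    let start_min := max 0 (position0 - window + 1)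
    let start_max := min position0 (PySem.Str.len sequence - window)
    if start_min > start_max then 0
    else
      let mutant_seq := PySem.List.slice sequence.toList none (some position0) ++ new_aa.toList ++ PySem.List.slice sequence.toList (some (position0 + 1)) none
      pvHits start_min start_max window mutant_seq - pvHits start_min start_max window sequence.toList

-- ===== PRECONDITION & SPEC =====
def Spec_local_aggregation_delta (sequence : String) (position0 : Int) (new_aa : String) (window : Int) (out : Int) : Prop := out = local_aggregation_delta_alt sequence position0 new_aa window
instance (sequence : String) (position0 : Int) (new_aa : String) (window : Int) (out : Int) : Decidable (Spec_local_aggregation_delta sequence position0 new_aa window out) := by unfold Spec_local_aggregation_delta; infer_instance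

-- ===== CLAIM (what is proved, stated in full; the proofs are below) =====
def Claim_equal_local_aggregation_delta : Prop := ∀ (sequence : String) (position0 : Int) (new_aa : String) (window : Int), Dom_local_aggregation_delta sequence position0 new_aa window → Spec_local_aggregation_delta sequence position0 new_aa window (local_aggregation_delta sequence position0 new_aa window)

-- ===== LEMMAS AND PROOFS =====

-- 0/1-fold is countP (as Int)
theorem pv_fold_count (p : Char → Prop) [DecidablePred p] (l : List Char) (a : Int) :
    l.foldl (fun a c => a + (if p c then (1 : Int) else 0)) a
      = a + l.countP (fun c => decide (p c)) := by
  induction l generalizing a with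
  | nil => simp
  | cons c cs ih =>
    rw [List.foldl_cons, ih, List.countP_cons]
    by_cases h : p c <;> simp [h] <;> try push_cast; ring

-- indexing the prefix list gives the prefix count
theorem pv_prefix_getD (p : Char → Bool) (s : List Char) (acc : Int) (i : ℕ)
    (hi : i ≤ s.length) :
    (pvPrefix p acc s).getD i 0 = acc + ((s.take i).countP p : Int) := by
  induction s generalizing acc i with
  | nil =>
    have h0 : i = 0 := Nat.le_zero.mp hi
    subst h0; simp [pvPrefix]
  | cons c cs ih =>
    cases i with
    | zero => simp [pvPrefix]
    | succ j =>
      have hj : j ≤ cs.length := by simpa using hi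
      rw [pvPrefix, List.getD_cons_succ, ih _ j hj, List.take_succ_cons, List.countP_cons]
      split_ifs <;> push_cast <;> ring

theorem pv_take_min {α : Type} (l : List α) (x : ℕ) : l.take (min x l.length) = l.take x := by
  rcases le_total x l.length with h | h
  · rw [min_eq_left h]
  · rw [min_eq_right h, List.take_length, List.take_of_length_le h]

-- prefix-count difference = count on the window slice
theorem pv_window_count (p : Char → Bool) (s : List Char) (a w : ℕ) :
    (((s.take (min (a + w) s.length)).countP p : Int) - ((s.take (min a s.length)).countP p : Int))
      = (((s.drop a).take w).countP p : Int) := by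
  rw [pv_take_min, pv_take_min, List.take_add, List.countP_append]
  push_cast; ring

theorem pv_mem_hyd (c : Char) :
    decide (c ∈ PySem.Set.ofList "FILVMWY".toList) = pvHydB c := by
  simp [pvHydB, PySem.Set.mem_ofList]

theorem pv_mem_beta (c : Char) :
    decide (c ∈ PySem.Set.ofList "VIYFWT".toList) = pvBetaB c := by
  simp [pvBetaB, PySem.Set.mem_ofList]

-- A's score of a window slice = B's prefix-difference indicator
theorem pv_score_eq (s : List Char) (start window : Int) (hs : 0 ≤ start) (hw : 0 ≤ window) :
    pvSegScore (PySem.List.slice s (some start) (some (start + window)))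
      = (if PySem.List.pyGetD (pvPrefix pvHydB 0 s) (min (start + window) (s.length : Int)) 0
             - PySem.List.pyGetD (pvPrefix pvHydB 0 s) (min start (s.length : Int)) 0 ≥ 4 ∧
           PySem.List.pyGetD (pvPrefix pvBetaB 0 s) (min (start + window) (s.length : Int)) 0
             - PySem.List.pyGetD (pvPrefix pvBetaB 0 s) (min start (s.length : Int)) 0 ≥ 3
         then (1 : Int) else 0) := by
  obtain ⟨a, rfl⟩ : ∃ a : ℕ, start = (a : Int) := ⟨start.toNat, (Int.toNat_of_nonneg hs).symm⟩
  obtain ⟨w, rfl⟩ : ∃ w : ℕ, window = (w : Int) := ⟨window.toNat, (Int.toNat_of_nonneg hw).symm⟩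
  have hcast : ((a : Int) + (w : Int)) = ((a + w : ℕ) : Int) := by push_cast; ring
  have hmin1 : min ((a : Int) + (w : Int)) (s.length : Int) = ((min (a + w) s.length : ℕ) : Int) := by
    rw [hcast]; push_cast [Nat.cast_min]; rfl
  have hmin2 : min ((a : Int)) (s.length : Int) = ((min a s.length : ℕ) : Int) := by
    push_cast [Nat.cast_min]; rfl
  rw [hmin1, hmin2, PySem.List.pyGetD_natCast, PySem.List.pyGetD_natCast,
      PySem.List.pyGetD_natCast, PySem.List.pyGetD_natCast,
      pv_prefix_getD _ _ _ _ (min_le_right _ _), pv_prefix_getD _ _ _ _ (min_le_right _ _),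
      pv_prefix_getD _ _ _ _ (min_le_right _ _), pv_prefix_getD _ _ _ _ (min_le_right _ _),
      PySem.List.slice_natCast_add]
  unfold pvSegScore
  dsimp only
  rw [pv_fold_count (fun aa => aa ∈ PySem.Set.ofList "FILVMWY".toList),
      pv_fold_count (fun aa => aa ∈ PySem.Set.ofList "VIYFWT".toList)]
  have hH : ∀ l : List Char, l.countP (fun c => decide (c ∈ PySem.Set.ofList "FILVMWY".toList)) = l.countP pvHydB :=
    fun l => List.countP_congr (fun c _ => by rw [pv_mem_hyd c])
  have hB : ∀ l : List Char, l.countP (fun c => decide (c ∈ PySem.Set.ofList "VIYFWT".toList)) = l.countP pvBetaB :=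
    fun l => List.countP_congr (fun c _ => by rw [pv_mem_beta c])
  simp only [hH, hB, zero_add]
  rw [pv_window_count pvHydB s a w, pv_window_count pvBetaB s a w]

-- pair-fold of the two 0/1 sums in A's loop
theorem pv_foldl_pair (L : List Int) (f g : Int → Int) (a b : Int) :
    L.foldl (fun (p : Int × Int) x => (p.1 + f x, p.2 + g x)) (a, b)
      = (a + (L.map f).sum, b + (L.map g).sum) := by
  induction L generalizing a b with
  | nil => simp
  | cons x xs ih => rw [List.foldl_cons, ih]; simp; constructor <;> ring

theorem pv_foldl_if (L : List Int) (c : Int → Prop) [DecidablePred c] (a : Int) :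
    L.foldl (fun total x => if c x then total + 1 else total) a
      = a + (L.map (fun x => if c x then (1 : Int) else 0)).sum := by
  induction L generalizing a with
  | nil => simp
  | cons x xs ih =>
    rw [List.foldl_cons, ih, List.map_cons, List.sum_cons]
    split_ifs with h <;> ring

-- B's hits(s) = the sum of A's per-window scores over the same starts
theorem pv_hits_sum (s : List Char) (smin smax window : Int) (h0 : 0 ≤ smin) (hw : 0 ≤ window) :
    pvHits smin smax window s
      = ((PySem.List.pyRange smin (smax + 1) 1).map
          (fun start => pvSegScore (PySem.List.slice s (some start) (some (start + window))))).sum := by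
  unfold pvHits
  rw [pv_foldl_if, zero_add]
  refine congrArg List.sum (List.map_congr_left ?_).symm
  intro start hstart
  have h1 : smin ≤ start := (PySem.List.mem_pyRange_one.mp hstart).1
  exact pv_score_eq s start window (le_trans h0 h1) hw

-- ===== VERDICT (by name: the statement is the Claim_ definition above) =====
theorem local_aggregation_delta_spec : Claim_equal_local_aggregation_delta := by
  intro sequence position0 new_aa window _
  unfold Spec_local_aggregation_delta local_aggregation_delta local_aggregation_delta_alt
  by_cases h1 : PySem.Str.len sequence < window
  · simp only [if_pos h1]
  · by_cases h2 : max 0 (position0 - window + 1) > min position0 (PySem.Str.len sequence - window)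
    · simp only [if_neg h1, if_pos h2]
    · simp only [if_neg h1, if_neg h2]
      have h2' : max 0 (position0 - window + 1) ≤ min position0 (PySem.Str.len sequence - window) :=
        le_of_not_gt h2
      have hw : 0 ≤ window := by
        have hb := le_trans (le_trans (le_max_right _ _) h2') (min_le_left _ _)
        omega
      have h0 : (0 : Int) ≤ max 0 (position0 - window + 1) := le_max_left _ _
      rw [pv_foldl_pair, pv_hits_sum _ _ _ _ h0 hw, pv_hits_sum _ _ _ _ h0 hw]
      simp
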